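-- pv_equiv track=rewrite | github.com/Pretty-boy1719/system_analysis_2025 | task3/task.py | _make_matrix
-- ===== SOURCE A (Python) =====
-- def _make_matrix(blocks, universe):
--     size = len(universe)
--     pos = {obj: idx for idx, obj in enumerate(universe)}
--     mat = [[0] * size for _ in range(size)]
--
--     for i, group in enumerate(blocks):
--         # внутри блока — взаимная достижимость
--         for x in group:
--             for y in group:
--                 mat[pos[x]][pos[y]] = 1
--
--         # блоки после текущего — "правее"
--         for follow in blocks[i + 1:]:
--             for x in group:
--                 for y in follow:
--                     mat[pos[x]][pos[y]] = 1
--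
--     return mat
-- ===== SOURCE B (Python) =====
-- def _make_matrix(blocks, universe):
--     size = len(universe)
--     pos = {obj: idx for idx, obj in enumerate(universe)}
--
--     # rank each position by the first and last block its object appears in
--     first, last = {}, {}
--     for bi, block in enumerate(blocks):
--         for e in block:
--             p = pos[e]
--             first.setdefault(p, bi)
--             last[p] = bi
--
--     # i reaches j iff i's first block is not after j's last block
--     return [[1 if i in first and j in last and first[i] <= last[j] else 0
--              for j in range(size)]
--             for i in range(size)]
-- ===== Notes on version B (the rewrite author's own statement) =====
-- stated objective: simpler
-- what changed: Replaces A's mutation of a zero matrix over enumerated block pairs (within-block and ordered block-pair quadruple loops) by one pass recording each position's first and last block rank and a direct double comprehension setting entry (i,j) iff first[i] <= last[j].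
import Mathlib
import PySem

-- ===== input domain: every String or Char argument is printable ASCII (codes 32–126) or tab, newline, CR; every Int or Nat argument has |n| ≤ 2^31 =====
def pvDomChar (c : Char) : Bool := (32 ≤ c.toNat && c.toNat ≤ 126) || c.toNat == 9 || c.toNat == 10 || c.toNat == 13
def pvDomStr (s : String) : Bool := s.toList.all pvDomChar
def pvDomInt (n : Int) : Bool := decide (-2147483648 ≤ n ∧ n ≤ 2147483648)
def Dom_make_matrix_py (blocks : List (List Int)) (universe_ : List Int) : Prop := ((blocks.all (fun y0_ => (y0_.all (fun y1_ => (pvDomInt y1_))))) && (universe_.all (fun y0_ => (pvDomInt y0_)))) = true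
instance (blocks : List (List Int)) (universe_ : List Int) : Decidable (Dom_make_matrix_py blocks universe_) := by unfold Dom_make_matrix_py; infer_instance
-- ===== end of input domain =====

-- B replaces A's block-pair enumeration with one first/last block-rank pass over the
-- positions and a direct double comprehension over indices (objective: simpler; A mutates
-- only a fresh local matrix, no caller-visible side effects).

-- ===== PORT A =====
-- mat[pos[x]][pos[y]] = 1 (List.set is a no-op out of range; under Pre_ indices are in range)
def setMat (m : List (List Int)) (i j : Nat) : List (List Int) :=
  m.set i ((m.getD i []).set j 1)

-- pos = {obj: idx for idx, obj in enumerate(universe)} (shared by both Pythons verbatim)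
def buildPos (universe_ : List Int) : PySem.Dict Int Nat :=
  (PySem.List.enumerate universe_ 0).foldl (fun d p => d.insert p.2 p.1.toNat) PySem.Dict.empty

-- pos[x] raises KeyError in Python when x ∉ universe; the port uses getD (those inputs are outside Pre_)
def make_matrix_py (blocks : List (List Int)) (universe_ : List Int) : List (List Int) :=
  let size := universe_.length
  let pos := buildPos universe_
  let mat0 := List.replicate size (List.replicate size (0 : Int))
  (PySem.List.enumerate blocks 0).foldl (fun mat ig =>
    let mat1 := ig.2.foldl (fun m x => ig.2.foldl (fun m y =>
        setMat m (pos.getD x 0) (pos.getD y 0)) m) mat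
    (PySem.List.slice blocks (some (ig.1 + 1)) none).foldl (fun m follow =>
        ig.2.foldl (fun m x => follow.foldl (fun m y =>
          setMat m (pos.getD x 0) (pos.getD y 0)) m) m) mat1) mat0

-- ===== PORT B =====
-- one pass recording the first and last block rank of each position; 'p = pos[e]' is
-- written out as 'pos.getD e 0' at each use (Python raises KeyError there exactly on the
-- inputs Pre_ excludes)
def buildLoHi (blocks : List (List Int)) (pos : PySem.Dict Int Nat) : PySem.Dict Nat Nat × PySem.Dict Nat Nat :=
  (PySem.List.enumerate blocks 0).foldl (fun fl p =>
     p.2.foldl (fun fl e =>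
        ((if fl.1.contains (pos.getD e 0) then fl.1 else fl.1.insert (pos.getD e 0) p.1.toNat),
         fl.2.insert (pos.getD e 0) p.1.toNat)) fl)
    (PySem.Dict.empty, PySem.Dict.empty)

def make_matrix_py_alt (blocks : List (List Int)) (universe_ : List Int) : List (List Int) :=
  let size := universe_.length
  let pos := buildPos universe_
  let fl := buildLoHi blocks pos
  (List.range size).map (fun i =>
    (List.range size).map (fun j =>
      if fl.1.contains i && fl.2.contains j && decide (fl.1.getD i 0 ≤ fl.2.getD j 0)
      then (1 : Int) else 0))

-- ===== PRECONDITION & SPEC =====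
-- Pre_ excludes exactly the inputs where both Pythons raise KeyError: a block element missing from universe
def Pre_make_matrix_py (blocks : List (List Int)) (universe_ : List Int) : Prop :=
  ∀ b ∈ blocks, ∀ x ∈ b, x ∈ universe_
instance (blocks : List (List Int)) (universe_ : List Int) : Decidable (Pre_make_matrix_py blocks universe_) := by unfold Pre_make_matrix_py; infer_instance
def pvWitness_make_matrix_py : List (List Int) × List Int := ([[1], [2]], [1, 2])

def Spec_make_matrix_py (blocks : List (List Int)) (universe_ : List Int) (out : List (List Int)) : Prop := out = make_matrix_py_alt blocks universe_
instance (blocks : List (List Int)) (universe_ : List Int) (out : List (List Int)) : Decidable (Spec_make_matrix_py blocks universe_ out) := by unfold Spec_make_matrix_py; infer_instance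

-- ===== CLAIM (what is proved, stated in full; the proofs are below) =====
def Claim_equal_make_matrix_py : Prop := ∀ (blocks : List (List Int)) (universe_ : List Int), Dom_make_matrix_py blocks universe_ → Pre_make_matrix_py blocks universe_ → Spec_make_matrix_py blocks universe_ (make_matrix_py blocks universe_)

-- ===== LEMMAS AND PROOFS =====

-- entry accessor; total, [] / 0 defaults never used at in-range indices
def get2 (m : List (List Int)) (i j : Nat) : Int := (m.getD i []).getD j 0

def applyAll (m : List (List Int)) (ps : List (Nat × Nat)) : List (List Int) :=
  ps.foldl (fun m q => setMat m q.1 q.2) m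

-- the exact list of (row, col) writes A performs, in A's order
def pairsA (blocks : List (List Int)) (universe_ : List Int) : List (Nat × Nat) :=
  let pos := buildPos universe_
  (PySem.List.enumerate blocks 0).flatMap (fun ig =>
    ig.2.flatMap (fun x => ig.2.map (fun y => (pos.getD x 0, pos.getD y 0)))
    ++ (PySem.List.slice blocks (some (ig.1 + 1)) none).flatMap (fun f =>
         ig.2.flatMap (fun x => f.map (fun y => (pos.getD x 0, pos.getD y 0)))))

-- recursion forms of the first/last folds, over the blocks mapped to positions
def loAux : Nat → List (List Nat) → PySem.Dict Nat Nat → PySem.Dict Nat Nat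
  | _, [], d => d
  | s, b :: bs, d =>
      loAux (s + 1) bs (b.foldl (fun d e => if d.contains e then d else d.insert e s) d)

def hiAux : Nat → List (List Nat) → PySem.Dict Nat Nat → PySem.Dict Nat Nat
  | _, [], d => d
  | s, b :: bs, d => hiAux (s + 1) bs (b.foldl (fun d e => d.insert e s) d)


theorem length_setMat (m : List (List Int)) (i j : Nat) : (setMat m i j).length = m.length := by
  simp [setMat]

theorem rowlen_setMat (m : List (List Int)) (i j k : Nat) :
    ((setMat m i j).getD k []).length = ((m.getD k []).length) := by
  simp only [setMat, List.getD_eq_getElem?_getD, List.getElem?_set]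
  by_cases h : i = k
  · subst h
    by_cases hl : i < m.length
    · simp [hl, List.getD_eq_getElem?_getD]
    · simp [hl]
  · simp [h]

theorem get2_setMat (m : List (List Int)) (i j a b : Nat) :
    get2 (setMat m i j) a b =
      if a = i ∧ b = j ∧ i < m.length ∧ j < (m.getD i []).length then 1 else get2 m a b := by
  simp only [get2, setMat, List.getD_eq_getElem?_getD, List.getElem?_set]
  by_cases hai : i = a
  · subst hai
    by_cases hl : i < m.length
    · simp only [if_pos rfl, hl, if_true]
      simp only [Option.getD_some, List.getElem?_set, List.getD_eq_getElem?_getD]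
      by_cases hbj : j = b
      · subst hbj
        by_cases hj : j < (m[i]?.getD []).length
        · have : (m[i]?.getD []) = m[i] := by simp [List.getElem?_eq_getElem hl]
          rw [this] at hj
          simp [hj, hl, this]
        · have : (m[i]?.getD []) = m[i] := by simp [List.getElem?_eq_getElem hl]
          rw [this] at hj
          simp [hj, hl, this]
      · simp only [if_neg hbj]
        have : ¬ (i = i ∧ b = j ∧ i < m.length ∧ j < (m[i]?.getD []).length) := by
          intro h; exact hbj h.2.1.symm
        have hb2 : ¬ (b = j) := fun h => hbj h.symm
        simp [hb2]
    · have : ¬ (i = i ∧ b = j ∧ i < m.length ∧ j < (m[i]?.getD []).length) := by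
        intro h; exact hl h.2.2.1
      simp [hl, this]
  · have : ¬ (a = i ∧ b = j ∧ i < m.length ∧ j < (m[i]?.getD []).length) := by
      intro h; exact hai h.1.symm
    simp [hai, this]

theorem length_applyAll (m : List (List Int)) (ps : List (Nat × Nat)) :
    (applyAll m ps).length = m.length := by
  induction ps generalizing m with
  | nil => rfl
  | cons q ps ih => simp [applyAll, List.foldl_cons] at ih ⊢; rw [ih, length_setMat]

theorem rowlen_applyAll (m : List (List Int)) (ps : List (Nat × Nat)) (k : Nat) :
    ((applyAll m ps).getD k []).length = (m.getD k []).length := by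
  induction ps generalizing m with
  | nil => rfl
  | cons q ps ih => simp only [applyAll, List.foldl_cons] at ih ⊢; rw [ih, rowlen_setMat]

theorem get2_applyAll (m : List (List Int)) (ps : List (Nat × Nat)) (a b : Nat) :
    get2 (applyAll m ps) a b =
      if (a, b) ∈ ps ∧ a < m.length ∧ b < (m.getD a []).length then 1 else get2 m a b := by
  induction ps generalizing m with
  | nil => simp [applyAll]
  | cons q ps ih =>
    simp only [applyAll, List.foldl_cons] at ih ⊢
    rw [ih, get2_setMat, length_setMat, rowlen_setMat]
    by_cases hm : (a, b) ∈ ps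
    · simp only [hm, true_and, List.mem_cons, or_true, List.getD_eq_getElem?_getD]
      by_cases hr : a < m.length ∧ b < (m[a]?.getD []).length
      · have hg : (m[a]?.getD ([] : List Int)) = m[a] := by
          simp [List.getElem?_eq_getElem hr.1]
        have hb : b < m[a].length := by rw [← hg]; exact hr.2
        simp [hr, hg, hb]
      · simp only [if_neg hr]
        have : ¬ (a = q.1 ∧ b = q.2 ∧ q.1 < m.length ∧ q.2 < (m[q.1]?.getD []).length) := by
          rintro ⟨h1, h2, h3, h4⟩; subst h1; subst h2; exact hr ⟨h3, h4⟩
        simp [this, get2, List.getD_eq_getElem?_getD]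
    · by_cases hq : a = q.1 ∧ b = q.2
      · obtain ⟨h1, h2⟩ := hq
        subst h1; subst h2
        simp [hm, List.mem_cons]
      · have : ¬ ((a, b) = q) := by
          intro h; exact hq ⟨congrArg Prod.fst h, congrArg Prod.snd h⟩
        simp [hm, this]
        intro h1 h2 h3 h4; exact absurd ⟨h1, h2⟩ hq

theorem applyAll_append (m : List (List Int)) (ps qs : List (Nat × Nat)) :
    applyAll m (ps ++ qs) = applyAll (applyAll m ps) qs := by
  simp [applyAll, List.foldl_append]

theorem foldl_applyAll_eq_flatMap {α : Type} (g : α → List (Nat × Nat)) (l : List α) (m : List (List Int)) :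
    l.foldl (fun m a => applyAll m (g a)) m = applyAll m (l.flatMap g) := by
  induction l generalizing m with
  | nil => rfl
  | cons x l ih => simp only [List.foldl_cons, List.flatMap_cons, applyAll_append, ih]

-- inner loop characterizations
theorem inner_hi_get? (b : List Nat) (d : PySem.Dict Nat Nat) (v : Nat) (x : Nat) :
    (b.foldl (fun d e => d.insert e v) d).get? x = if x ∈ b then some v else d.get? x := by
  induction b generalizing d with
  | nil => simp
  | cons e b ih =>
    simp only [List.foldl_cons, ih, List.mem_cons]
    by_cases hb : x ∈ b
    · simp [hb]
    · by_cases he : x = e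
      · simp [hb, he, PySem.Dict.get?_insert]
      · simp [hb, he, PySem.Dict.get?_insert]

theorem inner_lo_get? (b : List Nat) (d : PySem.Dict Nat Nat) (v : Nat) (x : Nat) :
    (b.foldl (fun d e => if d.contains e then d else d.insert e v) d).get? x =
      if d.contains x then d.get? x else if x ∈ b then some v else none := by
  induction b generalizing d with
  | nil =>
    simp only [List.foldl_nil, List.not_mem_nil, if_false]
    by_cases hc : d.contains x
    · simp [hc]
    · simp [hc, (PySem.Dict.get?_eq_none_iff_contains d x).2 (by simpa using hc)]
  | cons e b ih =>
    simp only [List.foldl_cons, List.mem_cons]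
    by_cases hce : d.contains e
    · rw [if_pos hce, ih]
      by_cases hcx : d.contains x
      · simp [hcx]
      · by_cases hxe : x = e
        · subst hxe; exact absurd hce hcx
        · simp [hcx, hxe]
    · rw [if_neg hce, ih]
      by_cases hxe : x = e
      · subst hxe
        simp [hce, PySem.Dict.contains_insert_self, PySem.Dict.get?_insert]
      · have hc' : (d.insert e v).contains x = d.contains x := by
          simp [PySem.Dict.contains_insert, hxe]
        rw [hc']
        by_cases hcx : d.contains x
        · simp [hcx, PySem.Dict.get?_insert, hxe]
        · simp [hcx, hxe]

theorem loAux_persist (bs : List (List Nat)) (s : Nat) (d : PySem.Dict Nat Nat) (e : Nat) (i : Nat)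
    (h : d.get? e = some i) : (loAux s bs d).get? e = some i := by
  induction bs generalizing s d with
  | nil => exact h
  | cons b bs ih =>
    apply ih
    rw [inner_lo_get?]
    have : d.contains e = true := by
      rw [PySem.Dict.contains_eq_isSome_get?, h]; rfl
    simp [this, h]

theorem loAux_cases (bs : List (List Nat)) (s : Nat) (d : PySem.Dict Nat Nat) (e : Nat) (r : Nat)
    (h : (loAux s bs d).get? e = some r) :
    d.get? e = some r ∨ ∃ k, ∃ _ : k < bs.length, r = s + k ∧ e ∈ bs[k] := by
  induction bs generalizing s d with
  | nil => exact Or.inl h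
  | cons b bs ih =>
    rcases ih _ _ h with h1 | ⟨k, hk, rfl, hm⟩
    · rw [inner_lo_get?] at h1
      by_cases hc : d.contains e
      · rw [if_pos hc] at h1; exact Or.inl h1
      · rw [if_neg hc] at h1
        by_cases hb : e ∈ b
        · rw [if_pos hb] at h1
          exact Or.inr ⟨0, by simp, by simpa using h1.symm, by simpa using hb⟩
        · rw [if_neg hb] at h1; exact absurd h1 (by simp)
    · exact Or.inr ⟨k + 1, by simpa using hk, by omega, by simpa using hm⟩

theorem loAux_le (bs : List (List Nat)) (k : Nat) (s : Nat) (d : PySem.Dict Nat Nat) (e : Nat)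
    (hk : k < bs.length) (hm : e ∈ bs[k]) (hd : ∀ i, d.get? e = some i → i ≤ s + k) :
    ∃ r, r ≤ s + k ∧ (loAux s bs d).get? e = some r := by
  induction bs generalizing s d k with
  | nil => simp at hk
  | cons b bs ih =>
    match k with
    | 0 =>
      have hb : e ∈ b := by simpa using hm
      have h1 : (b.foldl (fun d e => if d.contains e then d else d.insert e s) d).get? e =
          if d.contains e then d.get? e else some s := by
        rw [inner_lo_get?]; by_cases hc : d.contains e <;> simp [hc, hb]
      by_cases hc : d.contains e
      · rw [if_pos hc] at h1
        rw [PySem.Dict.contains_eq_isSome_get?] at hc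
        obtain ⟨i, hi⟩ := Option.isSome_iff_exists.1 (by simpa using hc)
        refine ⟨i, hd i hi, ?_⟩
        simp only [loAux]
        exact loAux_persist _ _ _ _ _ (h1.trans hi)
      · rw [if_neg hc] at h1
        refine ⟨s, by omega, ?_⟩
        simp only [loAux]
        exact loAux_persist _ _ _ _ _ h1
    | k + 1 =>
      have hk' : k < bs.length := by simpa using hk
      have hm' : e ∈ bs[k] := by simpa using hm
      have hd' : ∀ i, (b.foldl (fun d e => if d.contains e then d else d.insert e s) d).get? e = some i → i ≤ (s + 1) + k := by
        intro i hi
        rw [inner_lo_get?] at hi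
        by_cases hc : d.contains e
        · rw [if_pos hc] at hi; have := hd i hi; omega
        · rw [if_neg hc] at hi
          by_cases hb : e ∈ b
          · rw [if_pos hb] at hi; simp at hi; omega
          · rw [if_neg hb] at hi; simp at hi
      obtain ⟨r, hr, hget⟩ := ih k (s + 1)
        (b.foldl (fun d e => if d.contains e then d else d.insert e s) d) hk' hm' hd'
      refine ⟨r, by omega, ?_⟩
      simp only [loAux]
      exact hget

theorem hiAux_some (bs : List (List Nat)) (s : Nat) (d : PySem.Dict Nat Nat) (e : Nat) (i : Nat)
    (h : d.get? e = some i) : ∃ r, (hiAux s bs d).get? e = some r ∧ (r = i ∨ s ≤ r) := by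
  induction bs generalizing s d i with
  | nil => exact ⟨i, h, Or.inl rfl⟩
  | cons b bs ih =>
    by_cases hb : e ∈ b
    · have h1 : (b.foldl (fun d e => d.insert e s) d).get? e = some s := by
        rw [inner_hi_get?]; simp [hb]
      obtain ⟨r, hr, hor⟩ := ih (s + 1) (b.foldl (fun d e => d.insert e s) d) s h1
      exact ⟨r, by simpa [hiAux] using hr, Or.inr (by omega)⟩
    · have h1 : (b.foldl (fun d e => d.insert e s) d).get? e = some i := by
        rw [inner_hi_get?, if_neg hb]; exact h
      obtain ⟨r, hr, hor⟩ := ih (s + 1) (b.foldl (fun d e => d.insert e s) d) i h1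
      exact ⟨r, by simpa [hiAux] using hr, by omega⟩

theorem hiAux_cases (bs : List (List Nat)) (s : Nat) (d : PySem.Dict Nat Nat) (e : Nat) (r : Nat)
    (h : (hiAux s bs d).get? e = some r) :
    d.get? e = some r ∨ ∃ k, ∃ _ : k < bs.length, r = s + k ∧ e ∈ bs[k] := by
  induction bs generalizing s d with
  | nil => exact Or.inl h
  | cons b bs ih =>
    rcases ih _ _ h with h1 | ⟨k, hk, rfl, hm⟩
    · rw [inner_hi_get?] at h1
      by_cases hb : e ∈ b
      · rw [if_pos hb] at h1
        exact Or.inr ⟨0, by simp, by simpa using h1.symm, by simpa using hb⟩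
      · rw [if_neg hb] at h1; exact Or.inl h1
    · exact Or.inr ⟨k + 1, by simpa using hk, by omega, by simpa using hm⟩

theorem hiAux_ge (bs : List (List Nat)) (k : Nat) (s : Nat) (d : PySem.Dict Nat Nat) (e : Nat)
    (hk : k < bs.length) (hm : e ∈ bs[k]) :
    ∃ r, s + k ≤ r ∧ (hiAux s bs d).get? e = some r := by
  induction bs generalizing s d k with
  | nil => simp at hk
  | cons b bs ih =>
    match k with
    | 0 =>
      have hb : e ∈ b := by simpa using hm
      have h1 : (b.foldl (fun d e => d.insert e s) d).get? e = some s := by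
        rw [inner_hi_get?]; simp [hb]
      obtain ⟨r, hr, hor⟩ := hiAux_some bs (s + 1) _ e s h1
      exact ⟨r, by omega, hr⟩
    | k + 1 =>
      obtain ⟨r, hr, hget⟩ := ih k (s + 1) _ (by simpa using hk) (by simpa using hm)
      exact ⟨r, by omega, hget⟩

theorem lohi_fold (pos : PySem.Dict Int Nat) (bs : List (List Int)) (s : Nat)
    (lo hi : PySem.Dict Nat Nat) :
    (PySem.List.enumerate bs (s : Int)).foldl (fun fl p =>
       p.2.foldl (fun fl e =>
          ((if fl.1.contains (pos.getD e 0) then fl.1 else fl.1.insert (pos.getD e 0) p.1.toNat),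
           fl.2.insert (pos.getD e 0) p.1.toNat)) fl) (lo, hi)
      = (loAux s (bs.map (fun b => b.map (fun e => pos.getD e 0))) lo,
         hiAux s (bs.map (fun b => b.map (fun e => pos.getD e 0))) hi) := by
  induction bs generalizing s lo hi with
  | nil => simp [PySem.List.enumerate_nil, loAux, hiAux]
  | cons b bs ih =>
    rw [PySem.List.enumerate_cons, List.foldl_cons]
    have hmap : ∀ (fl : PySem.Dict Nat Nat × PySem.Dict Nat Nat),
        b.foldl (fun fl e =>
          ((if fl.1.contains (pos.getD e 0) then fl.1 else fl.1.insert (pos.getD e 0) ((s : Int)).toNat),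
           fl.2.insert (pos.getD e 0) ((s : Int)).toNat)) fl
        = (b.map (fun e => pos.getD e 0)).foldl (fun fl q =>
          ((if fl.1.contains q then fl.1 else fl.1.insert q ((s : Int)).toNat),
           fl.2.insert q ((s : Int)).toNat)) fl := by
      intro fl
      rw [List.foldl_map]
    rw [hmap]
    rw [PySem.List.foldl_prod_mk
        (f := fun (d : PySem.Dict Nat Nat) (q : Nat) => if d.contains q then d else d.insert q ((s : Int)).toNat)
        (g := fun (d : PySem.Dict Nat Nat) (q : Nat) => d.insert q ((s : Int)).toNat)]
    have hcast : ((s : Int) + 1) = (((s + 1 : Nat)) : Int) := by push_cast; ring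
    rw [hcast, ih]
    simp only [Int.toNat_natCast, loAux, hiAux, List.map_cons]

theorem buildLoHi_eq (blocks : List (List Int)) (pos : PySem.Dict Int Nat) :
    buildLoHi blocks pos
      = (loAux 0 (blocks.map (fun b => b.map (fun e => pos.getD e 0))) PySem.Dict.empty,
         hiAux 0 (blocks.map (fun b => b.map (fun e => pos.getD e 0))) PySem.Dict.empty) := by
  have := lohi_fold pos blocks 0 PySem.Dict.empty PySem.Dict.empty
  simpa [buildLoHi] using this

theorem foldl_set2 {α : Type} (fi fj : α → Nat) (l : List α) (m : List (List Int)) :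
    l.foldl (fun m a => setMat m (fi a) (fj a)) m = applyAll m (l.map (fun a => (fi a, fj a))) := by
  induction l generalizing m with
  | nil => rfl
  | cons x l ih => simp [applyAll, List.foldl_cons, ih]


theorem make_matrix_py_eq_applyAll (blocks : List (List Int)) (universe_ : List Int) :
    make_matrix_py blocks universe_ =
      applyAll (List.replicate universe_.length (List.replicate universe_.length (0 : Int)))
        (pairsA blocks universe_) := by
  unfold make_matrix_py pairsA
  simp only []
  set pos := buildPos universe_ with hpos
  set n := universe_.length
  rw [← foldl_applyAll_eq_flatMap]
  apply PySem.List.foldl_congr_mem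
  intro m ig _
  have e1 : ∀ (m : List (List Int)) (x : Int),
      ig.2.foldl (fun m y => setMat m (pos.getD x 0) (pos.getD y 0)) m
        = applyAll m (ig.2.map (fun y => (pos.getD x 0, pos.getD y 0))) := by
    intro m x
    exact foldl_set2 (fun _ => pos.getD x 0) (fun y => pos.getD y 0) ig.2 m
  have e2 : ∀ (m : List (List Int)),
      ig.2.foldl (fun m x => ig.2.foldl (fun m y => setMat m (pos.getD x 0) (pos.getD y 0)) m) m
        = applyAll m (ig.2.flatMap (fun x => ig.2.map (fun y => (pos.getD x 0, pos.getD y 0)))) := by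
    intro m
    rw [← foldl_applyAll_eq_flatMap]
    apply PySem.List.foldl_congr_mem
    intro m x _
    exact e1 m x
  have e3 : ∀ (m : List (List Int)) (f : List Int),
      ig.2.foldl (fun m x => f.foldl (fun m y => setMat m (pos.getD x 0) (pos.getD y 0)) m) m
        = applyAll m (ig.2.flatMap (fun x => f.map (fun y => (pos.getD x 0, pos.getD y 0)))) := by
    intro m f
    rw [← foldl_applyAll_eq_flatMap]
    apply PySem.List.foldl_congr_mem
    intro m x _
    exact foldl_set2 (fun _ => pos.getD x 0) (fun y => pos.getD y 0) f m
  have e4 : ∀ (m : List (List Int)),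
      (PySem.List.slice blocks (some (ig.1 + 1)) none).foldl (fun m follow =>
        ig.2.foldl (fun m x => follow.foldl (fun m y =>
          setMat m (pos.getD x 0) (pos.getD y 0)) m) m) m
        = applyAll m ((PySem.List.slice blocks (some (ig.1 + 1)) none).flatMap (fun f =>
            ig.2.flatMap (fun x => f.map (fun y => (pos.getD x 0, pos.getD y 0))))) := by
    intro m
    rw [← foldl_applyAll_eq_flatMap]
    apply PySem.List.foldl_congr_mem
    intro m f _
    exact e3 m f
  rw [e2, e4, ← applyAll_append]

theorem pairsA_mem_iff (blocks : List (List Int)) (universe_ : List Int) (i j : Nat) :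
    (i, j) ∈ pairsA blocks universe_ ↔
      (∃ l h,
        (loAux 0 (blocks.map (fun b => b.map (fun e => (buildPos universe_).getD e 0))) PySem.Dict.empty).get? i = some l ∧
        (hiAux 0 (blocks.map (fun b => b.map (fun e => (buildPos universe_).getD e 0))) PySem.Dict.empty).get? j = some h ∧
        l ≤ h) := by
  set pos := buildPos universe_ with hposdef
  set mblocks := blocks.map (fun b => b.map (fun e => pos.getD e 0)) with hmb
  have hmget : ∀ (k : Nat) (hk : k < blocks.length) (q : Nat),
      q ∈ mblocks[k]'(by simp [hmb]; omega) ↔ ∃ x ∈ blocks[k], pos.getD x 0 = q := by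
    intro k hk q
    simp [hmb]
  have hdrop : ∀ (k : Nat), PySem.List.slice blocks (some ((0 : Int) + (k : Int) + 1)) none
      = blocks.drop (k + 1) := by
    intro k
    have : ((0 : Int) + (k : Int) + 1) = (((k + 1 : Nat)) : Int) := by push_cast; ring
    rw [this, PySem.List.slice_from_natCast]
  constructor
  · intro hmemp
    unfold pairsA at hmemp
    simp only [List.mem_flatMap, List.mem_append, List.mem_map] at hmemp
    obtain ⟨ig, hig, hcase⟩ := hmemp
    obtain ⟨k, hk, rfl⟩ := (PySem.List.mem_enumerate_iff _ _ _).1 hig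
    have main : ∀ (x y : Int) (b1 b2 : Nat) (hb1 : b1 < blocks.length) (hb2 : b2 < blocks.length),
        b1 ≤ b2 → x ∈ blocks[b1] → y ∈ blocks[b2] →
        i = pos.getD x 0 → j = pos.getD y 0 →
        (∃ l h, (loAux 0 mblocks PySem.Dict.empty).get? i = some l ∧
                (hiAux 0 mblocks PySem.Dict.empty).get? j = some h ∧ l ≤ h) := by
      intro x y b1 b2 hb1 hb2 hble hx hy hieq hjeq
      have hxm : i ∈ mblocks[b1]'(by simp [hmb]; omega) := (hmget b1 hb1 i).2 ⟨x, hx, hieq.symm⟩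
      have hym : j ∈ mblocks[b2]'(by simp [hmb]; omega) := (hmget b2 hb2 j).2 ⟨y, hy, hjeq.symm⟩
      have hml : mblocks.length = blocks.length := by simp [hmb]
      obtain ⟨l, hlle, hl⟩ := loAux_le mblocks b1 0 PySem.Dict.empty i (by omega) hxm
        (by intro t ht; rw [show (PySem.Dict.empty : PySem.Dict Nat Nat).get? i = none from rfl] at ht; cases ht)
      obtain ⟨h, hhge, hh⟩ := hiAux_ge mblocks b2 0 PySem.Dict.empty j (by omega) hym
      exact ⟨l, h, hl, hh, by omega⟩
    rcases hcase with ⟨x, hx, y, hy, hxy⟩ | ⟨f, hf, x, hx, y, hy, hxy⟩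
    · have h1 : i = pos.getD x 0 := congrArg Prod.fst hxy |>.symm
      have h2 : j = pos.getD y 0 := congrArg Prod.snd hxy |>.symm
      exact main x y k k hk hk le_rfl (by simpa using hx) (by simpa using hy) h1 h2
    · rw [hdrop k] at hf
      obtain ⟨t, ht, hfe⟩ := List.mem_iff_getElem.1 hf
      have hlen : k + 1 + t < blocks.length := by
        have := ht; simp [List.length_drop] at this; omega
      have hfe' : f = blocks[k + 1 + t] := by
        rw [← hfe, List.getElem_drop]
      have h1 : i = pos.getD x 0 := congrArg Prod.fst hxy |>.symm
      have h2 : j = pos.getD y 0 := congrArg Prod.snd hxy |>.symm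
      refine main x y k (k + 1 + t) hk hlen (by omega) (by simpa using hx) ?_ h1 h2
      rw [← hfe']; exact hy
  · rintro ⟨l, h, hl, hh, hlh⟩
    rcases loAux_cases mblocks 0 PySem.Dict.empty i l hl with hbad | ⟨kl, hkl, hleq, hul⟩
    · rw [show (PySem.Dict.empty : PySem.Dict Nat Nat).get? i = none from rfl] at hbad; cases hbad
    rcases hiAux_cases mblocks 0 PySem.Dict.empty j h hh with hbad | ⟨kh, hkh, hheq, hvh⟩
    · rw [show (PySem.Dict.empty : PySem.Dict Nat Nat).get? j = none from rfl] at hbad; cases hbad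
    have hml : mblocks.length = blocks.length := by simp [hmb]
    have hleq' : l = kl := by omega
    have hheq' : h = kh := by omega
    subst hleq'; subst hheq'
    have hkl' : l < blocks.length := by omega
    have hkh' : h < blocks.length := by omega
    obtain ⟨x, hx, hxq⟩ := (hmget l hkl' i).1 hul
    obtain ⟨y, hy, hyq⟩ := (hmget h hkh' j).1 hvh
    unfold pairsA
    simp only [List.mem_flatMap, List.mem_append, List.mem_map]
    refine ⟨((0 : Int) + (l : Int), blocks[l]), (PySem.List.mem_enumerate_iff _ _ _).2 ⟨l, hkl', rfl⟩, ?_⟩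
    by_cases hcase : l = h
    · subst hcase
      exact Or.inl ⟨x, hx, y, hy, by rw [hxq, hyq]⟩
    · refine Or.inr ⟨blocks[h], ?_, x, hx, y, hy, by rw [hxq, hyq]⟩
      rw [hdrop l]
      have hlt : l < h := by omega
      have : blocks[h] = (blocks.drop (l + 1))[h - l - 1]'(by simp [List.length_drop]; omega) := by
        rw [List.getElem_drop]
        congr 1; omega
      rw [this]
      exact List.getElem_mem _

-- ===== VERDICT (by name: the statement is the Claim_ definition above) =====
theorem make_matrix_py_spec : Claim_equal_make_matrix_py := by
  unfold Claim_equal_make_matrix_py Spec_make_matrix_py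
  intro blocks universe_ _ _
  rw [make_matrix_py_eq_applyAll]
  simp only [make_matrix_py_alt]
  rw [buildLoHi_eq]
  dsimp only
  set n := universe_.length with hn
  set mat0 := List.replicate n (List.replicate n (0 : Int)) with hmat0
  have hmat0row : ∀ k : Nat, k < n → mat0.getD k [] = List.replicate n (0 : Int) := by
    intro k hk
    simp [hmat0, List.getD_eq_getElem?_getD, hk]
  have hLlen : (applyAll mat0 (pairsA blocks universe_)).length = n := by
    rw [length_applyAll]; simp [hmat0]
  apply List.ext_getElem
  · rw [hLlen]; simp
  intro a h1 h2
  have han : a < n := by rw [hLlen] at h1; exact h1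
  have hrowlen : ((applyAll mat0 (pairsA blocks universe_)).getD a []).length = n := by
    rw [rowlen_applyAll, hmat0row a han]; simp
  have hrow : (applyAll mat0 (pairsA blocks universe_))[a] =
      (applyAll mat0 (pairsA blocks universe_)).getD a [] := by
    rw [List.getD_eq_getElem?_getD, List.getElem?_eq_getElem h1]; rfl
  rw [hrow]
  apply List.ext_getElem
  · rw [hrowlen]; simp
  intro b h3 h4
  have hbn : b < n := by rw [hrowlen] at h3; exact h3
  have hleft : ((applyAll mat0 (pairsA blocks universe_)).getD a [])[b] =
      get2 (applyAll mat0 (pairsA blocks universe_)) a b := by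
    rw [get2, List.getD_eq_getElem?_getD (l := (applyAll mat0 (pairsA blocks universe_)).getD a []),
        List.getElem?_eq_getElem h3]; rfl
  rw [hleft, get2_applyAll]
  have hm0len : mat0.length = n := by simp [hmat0]
  have hget20 : get2 mat0 a b = 0 := by
    rw [get2, hmat0row a han]
    simp [List.getD_eq_getElem?_getD, hbn]
  simp only [List.getElem_map, List.getElem_range]
  have hiff : ((a, b) ∈ pairsA blocks universe_ ∧ a < mat0.length ∧ b < (mat0.getD a []).length) ↔
      ((loAux 0 (blocks.map (fun b => b.map (fun e => (buildPos universe_).getD e 0))) PySem.Dict.empty).contains a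
        && (hiAux 0 (blocks.map (fun b => b.map (fun e => (buildPos universe_).getD e 0))) PySem.Dict.empty).contains b
        && decide ((loAux 0 (blocks.map (fun b => b.map (fun e => (buildPos universe_).getD e 0))) PySem.Dict.empty).getD a 0
                    ≤ (hiAux 0 (blocks.map (fun b => b.map (fun e => (buildPos universe_).getD e 0))) PySem.Dict.empty).getD b 0)) = true := by
    rw [pairsA_mem_iff blocks universe_ a b]
    simp only [Bool.and_eq_true, decide_eq_true_eq]
    constructor
    · rintro ⟨⟨l, h, hl, hh, hlh⟩, _, _⟩
      have hcl : (loAux 0 (blocks.map (fun b => b.map (fun e => (buildPos universe_).getD e 0))) PySem.Dict.empty).contains a = true := by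
        rw [PySem.Dict.contains_eq_isSome_get?, hl]; rfl
      have hch : (hiAux 0 (blocks.map (fun b => b.map (fun e => (buildPos universe_).getD e 0))) PySem.Dict.empty).contains b = true := by
        rw [PySem.Dict.contains_eq_isSome_get?, hh]; rfl
      refine ⟨⟨hcl, hch⟩, ?_⟩
      rw [PySem.Dict.getD_eq_get?_getD, PySem.Dict.getD_eq_get?_getD, hl, hh]
      exact hlh
    · rintro ⟨⟨hcl, hch⟩, hle⟩
      rw [PySem.Dict.contains_eq_isSome_get?] at hcl hch
      obtain ⟨l, hl⟩ := Option.isSome_iff_exists.1 hcl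
      obtain ⟨h, hh⟩ := Option.isSome_iff_exists.1 hch
      rw [PySem.Dict.getD_eq_get?_getD, PySem.Dict.getD_eq_get?_getD, hl, hh] at hle
      refine ⟨⟨l, h, hl, hh, hle⟩, ?_, ?_⟩
      · rw [hm0len]; exact han
      · rw [hmat0row a han]; simpa using hbn
  by_cases hc : (a, b) ∈ pairsA blocks universe_ ∧ a < mat0.length ∧ b < (mat0.getD a []).length
  · rw [if_pos hc, if_pos (hiff.1 hc)]
  · rw [if_neg hc, hget20, if_neg (fun hb' => hc (hiff.2 hb'))]
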